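-- pv_equiv track=rewrite | github.com/Amitkumar9199/Nomura-GM-Quant-Challenge-2.0-2023 | finalcode/Q4.py | rec
-- ===== SOURCE A (Python) =====
-- def rec(digits, pos, sum1, sum2,val):
--     '''
--         rec :checks digits can be split into several numbers such that the sum of these is equal to the original number.
--         digits array contains the digits of the square of the number
--         pos is the current position in the digits array
--         sum1 is the sum of the numbers we have added by splitting the digits array
--         sum2 is the number we are currently building
--         val is the original number's square
--     '''
--     if sum1 + sum2 > val: # not fancy
--         return False
--     if pos == len(digits): # end of digits
--         if sum1 + sum2 == val: # if fancy
--             return True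
--         return False
--     # if we add the current digit to sum2 without updating total sum
--     # if we make sum2=digit and update total sum1 = sum1 + sum2
--     return rec(digits, pos+1, sum1+sum2, digits[pos],val) or rec(digits, pos+1, sum1, sum2*10 + digits[pos],val)
-- ===== SOURCE B (Python) =====
-- def rec(digits, pos, sum1, sum2, val):
--     # Iterative breadth-first DP: carry the SET of reachable (sum1, sum2) states
--     # position by position (deduplicating), instead of A's exponential DFS.
--     n = len(digits)
--     states = {(sum1, sum2)}
--     p = pos
--     while True:
--         states = {(a, b) for (a, b) in states if a + b <= val}
--         if p == n or not states:
--             break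
--         d = digits[p]
--         nxt = set()
--         for a, b in states:
--             nxt.add((a + b, d))
--             nxt.add((a, b * 10 + d))
--         states = nxt
--         p += 1
--     return p == n and any(a + b == val for (a, b) in states)
-- ===== Notes on version B (the rewrite author's own statement) =====
-- stated objective: alternative
-- what changed: Replaced A's exponential depth-first recursion by an iterative breadth-first dynamic programming pass that carries the deduplicated set of reachable (sum1, sum2) states position by position.
import Mathlib
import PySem

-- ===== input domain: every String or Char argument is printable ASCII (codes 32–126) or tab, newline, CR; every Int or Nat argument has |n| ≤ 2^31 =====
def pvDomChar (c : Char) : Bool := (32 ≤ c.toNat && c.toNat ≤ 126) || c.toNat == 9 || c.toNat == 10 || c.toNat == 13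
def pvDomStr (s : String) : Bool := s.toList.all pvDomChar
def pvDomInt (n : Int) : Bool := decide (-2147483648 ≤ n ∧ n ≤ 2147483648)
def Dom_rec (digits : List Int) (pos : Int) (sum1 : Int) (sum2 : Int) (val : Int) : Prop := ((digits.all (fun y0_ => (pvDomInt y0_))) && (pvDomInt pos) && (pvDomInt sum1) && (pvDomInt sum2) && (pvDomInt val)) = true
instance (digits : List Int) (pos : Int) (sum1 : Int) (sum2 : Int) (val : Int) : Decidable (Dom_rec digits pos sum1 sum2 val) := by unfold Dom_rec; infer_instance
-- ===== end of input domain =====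

-- B replaces A's exponential depth-first recursion by an iterative breadth-first pass over
-- the deduplicated set of reachable (sum1, sum2) states; same return value on all of Pre_.


-- ===== PORT A =====
def rec (digits : List Int) (pos : Int) (sum1 : Int) (sum2 : Int) (val : Int) : Bool :=
  if sum1 + sum2 > val then false
  else if pos = (digits.length : Int) then decide (sum1 + sum2 = val)
  else
    match h : PySem.List.pyGet? digits pos with
    | none => false   -- Python raises IndexError here; Pre_rec excludes these inputs
    | some d =>
        rec digits (pos + 1) (sum1 + sum2) d val || rec digits (pos + 1) sum1 (sum2 * 10 + d) val
termination_by ((digits.length : Int) - pos).toNat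
decreasing_by
  all_goals
    have hr : PySem.Raise.InRange digits.length pos := by
      by_contra hc
      rw [← PySem.List.pyGet?_eq_none_iff] at hc
      simp [hc] at h
    unfold PySem.Raise.InRange at hr
    omega

-- ===== PORT B =====
-- the while loop of Source B: state (p, states); returns their final values
def recAltLoop (digits : List Int) (val : Int) (p : Int) (states : PySem.Set (Int × Int)) :
    Int × PySem.Set (Int × Int) :=
  let states' := states.filter (fun s => decide (s.1 + s.2 ≤ val))
  if p = (digits.length : Int) ∨ states' = [] then (p, states')
  else
    match h : PySem.List.pyGet? digits p with
    | none => (p, states')   -- Python raises IndexError here; Pre_rec excludes these inputs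
    | some d =>
        recAltLoop digits val (p + 1)
          (states'.foldl
            (fun acc s => PySem.Set.add (PySem.Set.add acc (s.1 + s.2, d)) (s.1, s.2 * 10 + d))
            PySem.Set.empty)
termination_by ((digits.length : Int) - p).toNat
decreasing_by
  all_goals
    have hr : PySem.Raise.InRange digits.length p := by
      by_contra hc
      rw [← PySem.List.pyGet?_eq_none_iff] at hc
      simp [hc] at h
    unfold PySem.Raise.InRange at hr
    omega

def rec_alt (digits : List Int) (pos : Int) (sum1 : Int) (sum2 : Int) (val : Int) : Bool :=
  let r := recAltLoop digits val pos (PySem.Set.ofList [(sum1, sum2)])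
  decide (r.1 = (digits.length : Int)) && r.2.any (fun s => decide (s.1 + s.2 = val))

-- ===== PRECONDITION & SPEC =====
-- Pre_ excludes exactly the inputs on which the Python A raises IndexError (pos outside
-- [-len(digits), len(digits)] reached with sum1+sum2 ≤ val); B raises there too.
def Pre_rec (digits : List Int) (pos : Int) (sum1 : Int) (sum2 : Int) (val : Int) : Prop :=
  sum1 + sum2 > val ∨ (-(digits.length : Int) ≤ pos ∧ pos ≤ (digits.length : Int))
instance (digits : List Int) (pos : Int) (sum1 : Int) (sum2 : Int) (val : Int) : Decidable (Pre_rec digits pos sum1 sum2 val) := by unfold Pre_rec; infer_instance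

def pvWitness_rec : List Int × Int × Int × Int × Int := ([1, 0, 0], 0, 0, 0, 100)

def Spec_rec (digits : List Int) (pos : Int) (sum1 : Int) (sum2 : Int) (val : Int) (out : Bool) : Prop := out = rec_alt digits pos sum1 sum2 val
instance (digits : List Int) (pos : Int) (sum1 : Int) (sum2 : Int) (val : Int) (out : Bool) : Decidable (Spec_rec digits pos sum1 sum2 val out) := by unfold Spec_rec; infer_instance

-- ===== CLAIM (what is proved, stated in full; the proofs are below) =====
def Claim_equal_rec : Prop := ∀ (digits : List Int) (pos : Int) (sum1 : Int) (sum2 : Int) (val : Int), Dom_rec digits pos sum1 sum2 val → Pre_rec digits pos sum1 sum2 val → Spec_rec digits pos sum1 sum2 val (rec digits pos sum1 sum2 val)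

-- ===== LEMMAS AND PROOFS =====

-- membership in the fold that builds the next state set
theorem mem_expand (d : Int) (S : List (Int × Int)) (acc : PySem.Set (Int × Int)) (x : Int × Int) :
    x ∈ S.foldl
        (fun acc s => PySem.Set.add (PySem.Set.add acc (s.1 + s.2, d)) (s.1, s.2 * 10 + d)) acc ↔
      x ∈ acc ∨ ∃ s ∈ S, x = (s.1 + s.2, d) ∨ x = (s.1, s.2 * 10 + d) := by
  induction S generalizing acc with
  | nil => simp
  | cons a t ih =>
      simp only [List.foldl_cons, ih, PySem.Set.mem_add, List.mem_cons]
      constructor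
      · rintro (((h | h) | h) | ⟨s, hs, h⟩)
        · exact Or.inl h
        · exact Or.inr ⟨a, Or.inl rfl, Or.inl h⟩
        · exact Or.inr ⟨a, Or.inl rfl, Or.inr h⟩
        · exact Or.inr ⟨s, Or.inr hs, h⟩
      · rintro (h | ⟨s, (rfl | hs), h⟩)
        · exact Or.inl (Or.inl (Or.inl h))
        · rcases h with h | h
          · exact Or.inl (Or.inl (Or.inr h))
          · exact Or.inl (Or.inr h)
        · exact Or.inr ⟨s, hs, h⟩

-- one-step unfolding of A's port
theorem rec_unfold (digits : List Int) (pos sum1 sum2 val : Int) :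
    rec digits pos sum1 sum2 val =
      if sum1 + sum2 > val then false
      else if pos = (digits.length : Int) then decide (sum1 + sum2 = val)
      else
        match _h : PySem.List.pyGet? digits pos with
        | none => false
        | some d =>
            rec digits (pos + 1) (sum1 + sum2) d val ||
              rec digits (pos + 1) sum1 (sum2 * 10 + d) val := by
  rw [rec]

-- main loop invariant: B's loop answers "some state in S leads A to true"
theorem loop_correct (digits : List Int) (val : Int) :
    ∀ (p : Int) (S : List (Int × Int)),
      -(digits.length : Int) ≤ p → p ≤ (digits.length : Int) →
      (decide ((recAltLoop digits val p S).1 = (digits.length : Int)) &&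
        (recAltLoop digits val p S).2.any (fun s => decide (s.1 + s.2 = val))) =
      S.any (fun s => rec digits p s.1 s.2 val) := by
  intro p S hlo hhi
  have hm : ((digits.length : Int) - p).toNat = ((digits.length : Int) - p).toNat := rfl
  generalize hk : ((digits.length : Int) - p).toNat = k
  clear hm
  induction k generalizing p S with
  | zero =>
      -- p = length
      have hp : p = (digits.length : Int) := by omega
      subst hp
      rw [recAltLoop]
      rw [if_pos (Or.inl rfl : (digits.length : Int) = (digits.length : Int) ∨ _)]
      rw [Bool.eq_iff_iff]
      simp only [Bool.and_eq_true, decide_eq_true_eq, List.any_eq_true, List.mem_filter,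
        true_and]
      constructor
      · rintro ⟨s, ⟨hs, hle⟩, hv⟩
        refine ⟨s, hs, ?_⟩
        rw [rec_unfold, if_neg (by omega), if_pos rfl]
        simpa using hv
      · rintro ⟨s, hs, hv⟩
        by_cases hgt : s.1 + s.2 > val
        · rw [rec_unfold, if_pos hgt] at hv
          exact absurd hv (by simp)
        · rw [rec_unfold, if_neg hgt, if_pos rfl] at hv
          have hv' : s.1 + s.2 = val := by simpa using hv
          exact ⟨s, ⟨hs, by omega⟩, hv'⟩
  | succ k ih =>
      have hp : p < (digits.length : Int) := by omega
      rw [recAltLoop]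
      by_cases hE : S.filter (fun s => decide (s.1 + s.2 ≤ val)) = []
      · rw [if_pos (Or.inr hE)]
        have hR : S.any (fun s => rec digits p s.1 s.2 val) = false := by
          rw [List.any_eq_false]
          intro s hs
          have hgt : ¬ s.1 + s.2 ≤ val := by
            intro hle
            have hmem : s ∈ S.filter (fun s => decide (s.1 + s.2 ≤ val)) :=
              List.mem_filter.2 ⟨hs, by simpa⟩
            rw [hE] at hmem
            simp at hmem
          rw [rec_unfold, if_pos (by omega)]
          simp
        rw [hR, hE]
        simp
      · have hne : ¬ (p = (digits.length : Int) ∨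
            S.filter (fun s => decide (s.1 + s.2 ≤ val)) = []) := by
          rintro (h | h)
          · omega
          · exact hE h
        simp only [if_neg hne]
        have hin : PySem.Raise.InRange digits.length p := by
          unfold PySem.Raise.InRange; omega
        split
        next heq =>
          rw [PySem.List.pyGet?_eq_none_iff] at heq
          exact absurd hin heq
        next d hd =>
        rw [ih (p + 1) _ (by omega) (by omega) (by omega)]
        rw [Bool.eq_iff_iff]
        simp only [List.any_eq_true]
        constructor
        · rintro ⟨x, hx, hv⟩
          rw [mem_expand] at hx
          rcases hx with hx | ⟨s, hs, hx⟩
          · simp [PySem.Set.empty] at hx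
          · rw [List.mem_filter] at hs
            obtain ⟨hsS, hle⟩ := hs
            simp only [decide_eq_true_eq] at hle
            refine ⟨s, hsS, ?_⟩
            rw [rec_unfold, if_neg (by omega), if_neg (by omega), hd]
            rcases hx with rfl | rfl
            · simp only [Bool.or_eq_true]; exact Or.inl hv
            · simp only [Bool.or_eq_true]; exact Or.inr hv
        · rintro ⟨s, hs, hv⟩
          by_cases hgt : s.1 + s.2 > val
          · rw [rec_unfold, if_pos hgt] at hv
            exact absurd hv (by simp)
          · rw [rec_unfold, if_neg hgt, if_neg (by omega), hd] at hv
            simp only [Bool.or_eq_true] at hv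
            have hsf : s ∈ S.filter (fun s => decide (s.1 + s.2 ≤ val)) := by
              simp [List.mem_filter, hs]; omega
            rcases hv with hv | hv
            · exact ⟨(s.1 + s.2, d), (mem_expand _ _ _ _).2 (Or.inr ⟨s, hsf, Or.inl rfl⟩), hv⟩
            · exact ⟨(s.1, s.2 * 10 + d), (mem_expand _ _ _ _).2 (Or.inr ⟨s, hsf, Or.inr rfl⟩), hv⟩

-- ===== VERDICT (by name: the statement is the Claim_ definition above) =====
theorem rec_spec : Claim_equal_rec := by
  intro digits pos sum1 sum2 val _ hpre
  unfold Spec_rec rec_alt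
  have hofl : PySem.Set.ofList [((sum1 : Int), sum2)] = [(sum1, sum2)] :=
    PySem.Set.ofList_eq_self_of_nodup [((sum1 : Int), sum2)] (List.nodup_singleton _)
  simp only [hofl]
  by_cases hin : -(digits.length : Int) ≤ pos ∧ pos ≤ (digits.length : Int)
  · rw [loop_correct digits val pos [(sum1, sum2)] hin.1 hin.2]
    simp
  · have hgt : sum1 + sum2 > val := by
      rcases hpre with h | h
      · exact h
      · exact absurd h hin
    have hE : List.filter (fun s => decide (s.1 + s.2 ≤ val)) [((sum1 : Int), sum2)] = [] := by
      simp [List.filter_eq_nil_iff]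
      omega
    rw [rec_unfold, if_pos hgt, recAltLoop]
    simp [hE]
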